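-- pv_equiv track=rewrite | github.com/Enolaton/study | 프로그래머스/1/135808. 과일 장수/과일 장수.py | solution
-- ===== SOURCE A (Python) =====
-- def solution(k, m, score):
--     answer = 0
--     tmp = 0
--     score_list =[]
--     while k > 0:
--         if (score.count(k)+tmp)//m == 0:
--             tmp += score.count(k)%m
--         else:
--             answer += ((score.count(k)+tmp)//m)*m*k
--             tmp = (score.count(k)+tmp)%m
--         k -= 1
--     return answer
-- ===== SOURCE B (Python) =====
-- def solution(k, m, score):
--     s = sorted([x for x in score if 1 <= x <= k], reverse=True)
--     answer = 0
--     for i, x in enumerate(s):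
--         if i % m == m - 1:
--             answer += x * m
--     return answer
-- ===== Notes on version B (the rewrite author's own statement) =====
-- stated objective: faster
-- what changed: A scans every value from k down to 1, recounting the whole score list at each value and carrying leftovers; B sorts the in-range scores once in descending order and sums m times each box's smallest element in a single enumerated pass.
-- outside the precondition, e.g. on solution(3, -2, [3, 3, 3]): A returns 12, B returns 0
import Mathlib
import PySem

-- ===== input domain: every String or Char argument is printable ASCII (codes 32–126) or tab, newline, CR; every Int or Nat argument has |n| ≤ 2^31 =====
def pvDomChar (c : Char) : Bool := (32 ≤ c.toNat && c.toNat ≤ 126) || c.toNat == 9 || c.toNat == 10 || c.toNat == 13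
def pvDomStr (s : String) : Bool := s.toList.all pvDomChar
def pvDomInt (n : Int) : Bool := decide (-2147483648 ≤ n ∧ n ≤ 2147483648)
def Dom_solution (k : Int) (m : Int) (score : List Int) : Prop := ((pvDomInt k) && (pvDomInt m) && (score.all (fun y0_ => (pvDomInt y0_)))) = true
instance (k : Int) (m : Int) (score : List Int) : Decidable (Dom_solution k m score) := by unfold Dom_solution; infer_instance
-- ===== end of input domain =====

-- B replaces A's per-value counting loop with one descending sort plus a single strided pass (faster in a timing run).

-- ===== PORT A =====
-- A's while-loop: k counts down to 0; state (answer, tmp); score.count(k) via PySem.List.count.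
def solutionLoop (m : Int) (score : List Int) (k : Int) (answer : Int) (tmp : Int) : Int :=
  if _h : 0 < k then
    if PySem.Int.floordiv ((PySem.List.count score k : Int) + tmp) m = 0 then
      solutionLoop m score (k - 1) answer (tmp + PySem.Int.mod (PySem.List.count score k : Int) m)
    else
      solutionLoop m score (k - 1)
        (answer + PySem.Int.floordiv ((PySem.List.count score k : Int) + tmp) m * m * k)
        (PySem.Int.mod ((PySem.List.count score k : Int) + tmp) m)
  else answer
termination_by k.toNat
decreasing_by all_goals omega

def solution (k : Int) (m : Int) (score : List Int) : Int :=
  solutionLoop m score k 0 0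

-- ===== PORT B =====
-- Source B: s = sorted([x for x in score if 1 <= x <= k], reverse=True); then one enumerated pass.
def solution_alt (k : Int) (m : Int) (score : List Int) : Int :=
  let s := PySem.List.sorted (score.filter (fun x => decide (1 ≤ x) && decide (x ≤ k))) (fun x => x) true
  (PySem.List.enumerate s).foldl
    (fun answer p => if PySem.Int.mod p.1 m = m - 1 then answer + p.2 * m else answer) 0

-- ===== PRECONDITION & SPEC =====
-- Pre_ excludes m = 0 (A raises ZeroDivisionError) and m < 0 (a negative box size is outside the
-- task's natural domain; A's values there are accidents of floor division with a negative divisor).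
def Pre_solution (k : Int) (m : Int) (score : List Int) : Prop := 1 ≤ m
instance (k : Int) (m : Int) (score : List Int) : Decidable (Pre_solution k m score) := by unfold Pre_solution; infer_instance
def pvWitness_solution : Int × Int × List Int := (4, 3, [4, 1, 2, 4, 2, 4, 1, 2])

def Spec_solution (k : Int) (m : Int) (score : List Int) (out : Int) : Prop := out = solution_alt k m score
instance (k : Int) (m : Int) (score : List Int) (out : Int) : Decidable (Spec_solution k m score out) := by unfold Spec_solution; infer_instance

-- ===== CLAIM (what is proved, stated in full; the proofs are below) =====
def Claim_equal_solution : Prop := ∀ (k : Int) (m : Int) (score : List Int), Dom_solution k m score → Pre_solution k m score → Spec_solution k m score (solution k m score)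

-- ===== LEMMAS AND PROOFS =====

-- Canonical descending multiset of the in-range scores: value n down to 1, each repeated its count.
def descList (score : List Int) : Nat → List Int
  | 0 => []
  | n + 1 => List.replicate (PySem.List.count score ((n : Int) + 1)) ((n : Int) + 1) ++ descList score n

-- Box revenue of a stream whose first element has global index t: m * x for each x at index ≡ m-1 (mod m).
def boxSum (m : Int) (t : Int) : List Int → Int
  | [] => 0
  | x :: xs => (if PySem.Int.mod t m = m - 1 then x * m else 0) + boxSum m (t + 1) xs

theorem mem_descList {score : List Int} {n : Nat} {x : Int} (hx : x ∈ descList score n) :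
    1 ≤ x ∧ x ≤ (n : Int) := by
  induction n with
  | zero => simp [descList] at hx
  | succ n ih =>
    simp only [descList, List.mem_append, List.mem_replicate] at hx
    rcases hx with ⟨-, rfl⟩ | h
    · omega
    · have := ih h; omega

theorem pairwise_descList (score : List Int) (n : Nat) :
    (descList score n).Pairwise (fun a b => b ≤ a) := by
  induction n with
  | zero => simp [descList]
  | succ n ih =>
    simp only [descList]
    refine List.pairwise_append.mpr ⟨?_, ih, ?_⟩
    · exact List.pairwise_replicate.mpr (Or.inr le_rfl)
    · intro a ha b hb
      rw [List.eq_of_mem_replicate ha]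
      have := mem_descList hb; omega

theorem perm_descList (score : List Int) (n : Nat) :
    (score.filter (fun x => decide (1 ≤ x) && decide (x ≤ (n : Int)))).Perm (descList score n) := by
  induction n with
  | zero =>
    have : score.filter (fun x => decide (1 ≤ x) && decide (x ≤ (0 : Int))) = [] := by
      rw [List.filter_eq_nil_iff]; intro a _; simp; omega
    simp [this, descList]
  | succ n ih =>
    have hsplit := (List.filter_append_perm (fun x => x == ((n : Int) + 1))
      (score.filter (fun x => decide (1 ≤ x) && decide (x ≤ ((n : Nat) + 1 : Int))))).symm
    have h1 : (score.filter (fun x => decide (1 ≤ x) && decide (x ≤ ((n : Nat) + 1 : Int)))).filter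
        (fun x => x == ((n : Int) + 1)) = List.replicate (PySem.List.count score ((n : Int) + 1)) ((n : Int) + 1) := by
      rw [List.filter_filter, PySem.List.count_eq, ← List.filter_beq]
      apply List.filter_congr
      intro a _
      by_cases h : a = (n : Int) + 1
      · subst h
        simp
      · simp [h]
    have h2 : (score.filter (fun x => decide (1 ≤ x) && decide (x ≤ ((n : Nat) + 1 : Int)))).filter
        (fun x => !(x == ((n : Int) + 1))) = score.filter (fun x => decide (1 ≤ x) && decide (x ≤ (n : Int))) := by
      rw [List.filter_filter]
      apply List.filter_congr
      intro a _
      by_cases h : a = (n : Int) + 1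
      · subst h
        have hn : ¬ ((n : Int) + 1 ≤ (n : Int)) := by omega
        simp [hn]
      · have hb : (a == (n : Int) + 1) = false := by simp [h]
        simp only [hb, Bool.not_false, Bool.true_and]
        congr 1
        simp only [decide_eq_decide]
        constructor <;> (intro hle; omega)
    rw [h1, h2] at hsplit
    exact hsplit.trans (List.Perm.append_left _ ih)

theorem sorted_eq_descList (score : List Int) (k : Int) :
    PySem.List.sorted (score.filter (fun x => decide (1 ≤ x) && decide (x ≤ k))) (fun x => x) true
      = descList score k.toNat := by
  have hk : ∀ x : Int, (decide (1 ≤ x) && decide (x ≤ k)) = (decide (1 ≤ x) && decide (x ≤ (k.toNat : Int))) := by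
    intro x; by_cases h1 : 1 ≤ x <;> by_cases h2 : x ≤ k <;> simp [h1, h2] <;> omega
  have hfil : score.filter (fun x => decide (1 ≤ x) && decide (x ≤ k))
      = score.filter (fun x => decide (1 ≤ x) && decide (x ≤ (k.toNat : Int))) :=
    List.filter_congr (fun a _ => hk a)
  rw [hfil]
  have hperm : (descList score k.toNat).Perm
      (score.filter (fun x => decide (1 ≤ x) && decide (x ≤ (k.toNat : Int)))) :=
    (perm_descList score k.toNat).symm
  have hs := PySem.List.sorted_perm
    (score.filter (fun x => decide (1 ≤ x) && decide (x ≤ (k.toNat : Int)))) (fun x : Int => x) true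
  refine List.Perm.eq_of_pairwise (fun a b _ _ h1 h2 => le_antisymm h2 h1) ?_ ?_ (hs.trans hperm.symm)
  · exact PySem.List.sorted_pairwise_rev _ _
  · exact pairwise_descList score k.toNat

-- The stream counter only matters modulo m.
theorem boxSum_congr_mod (m : Int) (hm : 1 ≤ m) (s : List Int) :
    ∀ t t' : Int, t % m = t' % m → boxSum m t s = boxSum m t' s := by
  induction s with
  | nil => intro t t' _; rfl
  | cons x xs ih =>
    intro t t' h
    have hmod : PySem.Int.mod t m = PySem.Int.mod t' m := by
      rw [PySem.Int.mod_eq_emod_of_pos (by omega), PySem.Int.mod_eq_emod_of_pos (by omega)]; exact h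
    simp only [boxSum, hmod, ih (t + 1) (t' + 1) (Int.ModEq.add_right 1 h)]

theorem boxSum_replicate_append (m : Int) (hm : 1 ≤ m) (v : Int) (rest : List Int) :
    ∀ (c : Nat) (t : Int), 0 ≤ t → t < m →
      boxSum m t (List.replicate c v ++ rest)
        = PySem.Int.floordiv (t + c) m * m * v + boxSum m (PySem.Int.mod (t + c) m) rest := by
  intro c
  induction c with
  | zero =>
    intro t h0 h1
    rw [PySem.Int.floordiv_eq_ediv_of_pos (by omega), PySem.Int.mod_eq_emod_of_pos (by omega)]
    simp [Int.ediv_eq_zero_of_lt (by omega) (by omega), Int.emod_eq_of_lt (by omega) (by omega)]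
  | succ c ih =>
    intro t h0 h1
    rw [List.replicate_succ, List.cons_append]
    simp only [boxSum]
    rw [PySem.Int.mod_eq_emod_of_pos (by omega), Int.emod_eq_of_lt (by omega) (by omega)]
    by_cases hb : t = m - 1
    · subst hb
      have hcong : boxSum m (m - 1 + 1) (List.replicate c v ++ rest)
          = boxSum m 0 (List.replicate c v ++ rest) := by
        apply boxSum_congr_mod m hm
        have : m - 1 + 1 = 0 + m * 1 := by ring
        rw [this, Int.add_mul_emod_self_left]
      rw [if_pos rfl, hcong, ih 0 le_rfl (by omega)]
      have hdiv : PySem.Int.floordiv (m - 1 + (c + 1 : Nat)) m = PySem.Int.floordiv (0 + (c : Nat)) m + 1 := by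
        rw [PySem.Int.floordiv_eq_ediv_of_pos (by omega), PySem.Int.floordiv_eq_ediv_of_pos (by omega)]
        have h : (m - 1 + (c + 1 : Nat) : Int) = (0 + (c : Nat)) + 1 * m := by push_cast; ring
        rw [h, Int.add_mul_ediv_right _ _ (by omega : m ≠ 0)]
      have hmod : PySem.Int.mod (m - 1 + (c + 1 : Nat)) m = PySem.Int.mod (0 + (c : Nat)) m := by
        rw [PySem.Int.mod_eq_emod_of_pos (by omega), PySem.Int.mod_eq_emod_of_pos (by omega)]
        have h : (m - 1 + (c + 1 : Nat) : Int) = (0 + (c : Nat)) + m * 1 := by push_cast; ring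
        rw [h, Int.add_mul_emod_self_left]
      rw [hdiv, hmod]; ring
    · rw [if_neg hb, ih (t + 1) (by omega) (by omega)]
      have h : t + 1 + (c : Nat) = t + ((c + 1 : Nat) : Int) := by push_cast; ring
      rw [h]; ring

-- A's loop computes the strided box revenue over the descending multiset.
theorem solutionLoop_eq (m : Int) (hm : 1 ≤ m) (score : List Int) :
    ∀ (n : Nat) (answer tmp : Int), 0 ≤ tmp → tmp < m →
      solutionLoop m score (n : Int) answer tmp = answer + boxSum m tmp (descList score n) := by
  intro n
  induction n with
  | zero =>
    intro answer tmp h0 h1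
    rw [solutionLoop]
    simp [descList, boxSum]
  | succ n ih =>
    intro answer tmp h0 h1
    rw [solutionLoop]
    have hpos : (0 : Int) < ((n + 1 : Nat) : Int) := by push_cast; omega
    rw [dif_pos hpos]
    have hc0 : (0 : Int) ≤ (PySem.List.count score ((n + 1 : Nat) : Int) : Int) := by positivity
    have hk1 : ((n + 1 : Nat) : Int) - 1 = (n : Int) := by push_cast; ring
    have hkc : ((n + 1 : Nat) : Int) = (n : Int) + 1 := by push_cast; ring
    have hdesc : descList score (n + 1)
        = List.replicate (PySem.List.count score ((n : Int) + 1)) ((n : Int) + 1) ++ descList score n := rfl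
    set c : Int := (PySem.List.count score ((n + 1 : Nat) : Int) : Int) with hc
    have hsplit := boxSum_replicate_append m hm ((n : Int) + 1) (descList score n)
      (PySem.List.count score ((n : Int) + 1)) tmp h0 h1
    have hcc : ((PySem.List.count score ((n : Int) + 1) : Nat) : Int) = c := by rw [hc, hkc]
    rw [hcc] at hsplit
    by_cases hz : PySem.Int.floordiv (c + tmp) m = 0
    · rw [if_pos hz]
      have hctm : c + tmp < m := by
        by_contra hge
        rw [PySem.Int.floordiv_eq_ediv_of_pos (by omega)] at hz
        have := Int.le_ediv_iff_mul_le (by omega : (0:Int) < m) |>.mpr (by omega : 1 * m ≤ c + tmp)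
        omega
      have hcm : PySem.Int.mod c m = c := by
        rw [PySem.Int.mod_eq_emod_of_pos (by omega)]
        exact Int.emod_eq_of_lt (by omega) (by omega)
      rw [hk1, hcm, ih answer (tmp + c) (by omega) (by omega), hdesc, hsplit]
      have hmod : PySem.Int.mod (tmp + c) m = tmp + c := by
        rw [PySem.Int.mod_eq_emod_of_pos (by omega)]
        exact Int.emod_eq_of_lt (by omega) (by omega)
      have hzz : PySem.Int.floordiv (tmp + c) m = 0 := by rw [show tmp + c = c + tmp by ring]; exact hz
      rw [hmod, hzz]
      ring
    · rw [if_neg hz]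
      have hmn : 0 ≤ PySem.Int.mod (c + tmp) m := PySem.Int.mod_nonneg (c + tmp) (by omega)
      have hml : PySem.Int.mod (c + tmp) m < m := PySem.Int.mod_lt (c + tmp) (by omega)
      rw [hk1, ih _ (PySem.Int.mod (c + tmp) m) hmn hml, hdesc, hsplit]
      rw [show tmp + c = c + tmp by ring, hkc]
      ring

-- B's enumerated fold computes the same strided box revenue.
theorem foldl_enumerate_eq (m : Int) :
    ∀ (s : List Int) (t a : Int),
      (PySem.List.enumerate s t).foldl
          (fun answer p => if PySem.Int.mod p.1 m = m - 1 then answer + p.2 * m else answer) a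
        = a + boxSum m t s := by
  intro s
  induction s with
  | nil => intro t a; simp [PySem.List.enumerate_nil, boxSum]
  | cons x xs ih =>
    intro t a
    rw [PySem.List.enumerate_cons, List.foldl_cons, ih]
    simp only [boxSum]
    by_cases h : PySem.Int.mod t m = m - 1 <;> simp [h] <;> ring

-- ===== VERDICT (by name: the statement is the Claim_ definition above) =====
theorem solution_spec : Claim_equal_solution := by
  intro k m score _ hpre
  unfold Spec_solution solution solution_alt Pre_solution at *
  rw [foldl_enumerate_eq, sorted_eq_descList]
  by_cases hk : 0 < k
  · have hkk : k = (k.toNat : Int) := by omega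
    rw [hkk, solutionLoop_eq m hpre score k.toNat 0 0 le_rfl (by omega), Int.toNat_natCast]
  · have hkt : k.toNat = 0 := by omega
    rw [solutionLoop, dif_neg hk, hkt]
    simp [descList, boxSum]
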